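-- pv_equiv track=rewrite | github.com/Dong-Kyu-Lee7/programmers | 프로그래머스/0/181880. 1로 만들기/1로 만들기.py | solution
-- ===== SOURCE A (Python) =====
-- def solution(num_list):
--     result = 0
--
--     for x in num_list:
--         count = 0 # 연산 횟수
--
--         while x != 1:
--             count += 1 # 연산 횟수 카운팅
--             if x % 2 == 0:
--                 x //= 2
--             else:
--                 x = (x-1) // 2
--
--         result += count
--     return result
-- ===== SOURCE B (Python) =====
-- def solution(num_list):
--     # closed form: halving steps from x down to 1 = floor(log2 x) = bit_length - 1
--     return sum(x.bit_length() - 1 for x in num_list)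
-- ===== Notes on version B (the rewrite author's own statement) =====
-- stated objective: simpler
-- what changed: Replaces A's per-element halving while-loop with the closed form x.bit_length()-1 (floor log2) summed over the list; Pre_ restricts to lists of positive integers, since A's while-loop never terminates on elements <= 0.
import Mathlib
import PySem

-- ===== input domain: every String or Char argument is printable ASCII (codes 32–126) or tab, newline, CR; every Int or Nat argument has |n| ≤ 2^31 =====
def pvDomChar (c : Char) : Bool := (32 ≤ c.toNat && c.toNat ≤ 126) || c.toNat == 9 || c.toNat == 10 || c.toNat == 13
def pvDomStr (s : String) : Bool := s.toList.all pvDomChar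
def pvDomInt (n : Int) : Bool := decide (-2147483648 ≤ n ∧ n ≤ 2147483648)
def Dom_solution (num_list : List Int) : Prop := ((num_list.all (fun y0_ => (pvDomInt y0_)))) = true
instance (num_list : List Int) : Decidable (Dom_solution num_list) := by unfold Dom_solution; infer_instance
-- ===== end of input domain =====

-- B replaces A's per-element halving while-loop with the closed form bit_length - 1 (floor log2).

-- ===== PORT A =====
-- A's inner while-loop; the guard `1 < x` makes it total in Lean (for the admitted
-- inputs, x ≥ 1 throughout, where `x ≠ 1` and `1 < x` coincide; on x ≤ 0 Python diverges).
def loopA (x : Int) (count : Int) : Int :=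
  if 1 < x then
    if PySem.Int.mod x 2 == 0 then
      loopA (PySem.Int.floordiv x 2) (count + 1)
    else
      loopA (PySem.Int.floordiv (x - 1) 2) (count + 1)
  else count
termination_by x.toNat
decreasing_by
  · simp only [PySem.Int.floordiv_eq_ediv_of_pos (by omega : (0:Int) < 2)]; omega
  · simp only [PySem.Int.floordiv_eq_ediv_of_pos (by omega : (0:Int) < 2)]; omega

def solution (num_list : List Int) : Int :=
  num_list.foldl (fun result x => result + loopA x 0) 0

-- ===== PORT B =====
def solution_alt (num_list : List Int) : Int :=
  (num_list.map (fun x => (PySem.Int.bitLength x : Int) - 1)).sum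

-- ===== PRECONDITION & SPEC =====
-- Pre_ excludes lists containing an element ≤ 0: there A's while-loop never terminates.
def Pre_solution (num_list : List Int) : Prop := ∀ x ∈ num_list, 1 ≤ x
instance (num_list : List Int) : Decidable (Pre_solution num_list) := by unfold Pre_solution; infer_instance
def pvWitness_solution : List Int := [1, 8, 5, 1000000]

def Spec_solution (num_list : List Int) (out : Int) : Prop := out = solution_alt num_list
instance (num_list : List Int) (out : Int) : Decidable (Spec_solution num_list out) := by unfold Spec_solution; infer_instance

-- ===== CLAIM (what is proved, stated in full; the proofs are below) =====
def Claim_equal_solution : Prop := ∀ (num_list : List Int), Dom_solution num_list → Pre_solution num_list → Spec_solution num_list (solution num_list)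

-- ===== LEMMAS AND PROOFS =====

lemma loopA_eq (n : Nat) : ∀ (x : Int), x.toNat = n → 1 ≤ x → ∀ (c : Int),
    loopA x c = c + ((PySem.Int.bitLength x : Int) - 1) := by
  induction n using Nat.strong_induction_on with
  | _ n ih =>
    intro x hn hx c
    by_cases hgt : 1 < x
    · have h2 : (0:Int) < 2 := by omega
      have hfd : PySem.Int.floordiv x 2 = x / 2 := PySem.Int.floordiv_eq_ediv_of_pos h2
      have hfd' : PySem.Int.floordiv (x - 1) 2 = (x - 1) / 2 := PySem.Int.floordiv_eq_ediv_of_pos h2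
      have hbl : PySem.Int.bitLength x = PySem.Int.bitLength (PySem.Int.floordiv x 2) + 1 :=
        PySem.Int.bitLength_of_pos (by omega)
      have hy1 : 1 ≤ x / 2 := by omega
      have hylt : (x / 2).toNat < n := by omega
      rw [loopA]
      simp only [hgt, if_true]
      by_cases hm : PySem.Int.mod x 2 == 0
      · simp only [hm, if_true]
        rw [hfd, ih _ hylt (x / 2) rfl hy1]
        rw [hbl, hfd]
        push_cast
        ring
      · simp only [hm]
        have hodd : (x - 1) / 2 = x / 2 := by
          have hmod : PySem.Int.mod x 2 = x % 2 := PySem.Int.mod_eq_emod_of_pos h2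
          have : x % 2 ≠ 0 := by
            intro h; apply hm; rw [hmod, h]; rfl
          omega
        rw [hfd', hodd, ih _ hylt (x / 2) rfl hy1]
        rw [hbl, hfd]
        push_cast
        ring
    · have hx1 : x = 1 := by omega
      subst hx1
      rw [loopA]
      norm_num
      decide

lemma foldl_sum (l : List Int) (h : ∀ x ∈ l, 1 ≤ x) : ∀ (r : Int),
    l.foldl (fun result x => result + loopA x 0) r
      = r + (l.map (fun x => (PySem.Int.bitLength x : Int) - 1)).sum := by
  induction l with
  | nil => intro r; simp
  | cons a l ihl =>
    intro r
    simp only [List.foldl_cons, List.map_cons, List.sum_cons]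
    rw [ihl (fun x hx => h x (List.mem_cons_of_mem _ hx))]
    rw [loopA_eq a.toNat a rfl (h a (List.mem_cons_self)) 0]
    ring

-- ===== VERDICT (by name: the statement is the Claim_ definition above) =====
theorem solution_spec : Claim_equal_solution := by
  intro num_list _ hpre
  unfold Spec_solution solution solution_alt
  rw [foldl_sum num_list hpre 0]
  ring
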